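-- pv_equiv track=rewrite | github.com/jeff-donovan/aoc-2024 | day_21/part2_attempt3.py | _get_winner_index
-- ===== SOURCE A (Python) =====
-- def _get_winner_index(seq_lengths):
--     max_level = max([max(seq_tree.keys()) for seq_tree in seq_lengths if len(seq_tree.keys()) > 0])
--     shortest_path_length = None
--     sequences_with_shortest_path = []
--     for i, sequence_tree in enumerate(seq_lengths):
--         if max_level not in sequence_tree:
--             continue
--
--         min_length = calculate_min_path_length(sequence_tree[max_level])
--         if shortest_path_length is None:
--             shortest_path_length = min_length
--
--         if min_length == shortest_path_length:
--             sequences_with_shortest_path.append(i)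
--
--         if min_length < shortest_path_length:
--             shortest_path_length = min_length
--             sequences_with_shortest_path = [i]
--
--     if len(sequences_with_shortest_path) == 1:
--         return sequences_with_shortest_path[0]
--
-- def calculate_min_path_length(paths):
--     return min([len(path) for path in paths])
-- ===== SOURCE B (Python) =====
-- def _get_winner_index(seq_lengths):
--     max_level = max(k for tree in seq_lengths for k in tree)
--     table = sorted(
--         ((i, min(len(p) for p in tree[max_level]))
--          for i, tree in enumerate(seq_lengths) if max_level in tree),
--         key=lambda e: e[1])
--     if len(table) == 1 or table[0][1] != table[1][1]:
--         return table[0][0]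
-- ===== Notes on version B (the rewrite author's own statement) =====
-- stated objective: alternative
-- what changed: B replaces A's single-pass running-minimum loop with reset-on-improvement winner list by a sort-based method: stably sort the (index, min-length) table by length and decide uniqueness by comparing the first two entries of the sorted table.
import Mathlib
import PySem

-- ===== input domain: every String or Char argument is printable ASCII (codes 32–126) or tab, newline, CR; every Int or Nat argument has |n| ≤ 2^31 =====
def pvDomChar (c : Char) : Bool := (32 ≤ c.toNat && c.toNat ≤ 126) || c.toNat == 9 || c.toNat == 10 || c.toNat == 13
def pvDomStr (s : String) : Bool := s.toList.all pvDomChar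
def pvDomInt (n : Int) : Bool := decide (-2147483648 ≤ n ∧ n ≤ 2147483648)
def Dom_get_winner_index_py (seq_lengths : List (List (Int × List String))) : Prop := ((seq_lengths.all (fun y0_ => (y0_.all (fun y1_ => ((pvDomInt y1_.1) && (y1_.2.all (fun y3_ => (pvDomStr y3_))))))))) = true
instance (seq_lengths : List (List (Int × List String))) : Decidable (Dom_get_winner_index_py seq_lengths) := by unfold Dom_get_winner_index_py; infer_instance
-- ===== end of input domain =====

-- B replaces A's running-minimum/reset loop by stably sorting the (index, min-length) table
-- by length and deciding the unique winner from the first two sorted entries; objective: alternative.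

-- ===== PORT A =====
-- helper calculate_min_path_length: 'min([len(path) for path in paths])' (none = ValueError on empty paths)
def calculate_min_path_length_py (paths : List String) : Option Int :=
  PySem.List.min? (paths.map (fun path => PySem.Str.len path)) (fun x => x)

def get_winner_index_py (seq_lengths : List (List (Int × List String))) : Option Int :=
  -- max_level = max([max(seq_tree.keys()) for seq_tree in seq_lengths if len(seq_tree.keys()) > 0])
  -- (the '.getD 0' default is unreachable: the tree is filtered nonempty; the outer none = ValueError, excluded by Pre_)
  match PySem.List.max?
      ((seq_lengths.filter
          (fun seq_tree => 0 < PySem.List.len (PySem.Dict.keys (PySem.Dict.mk seq_tree)))).map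
        (fun seq_tree =>
          (PySem.List.max? (PySem.Dict.keys (PySem.Dict.mk seq_tree)) (fun k => k)).getD 0))
      (fun m => m) with
  | none => none
  | some max_level =>
    let st := (PySem.List.enumerate seq_lengths).foldl
      (fun (st : Option Int × List Int) p =>
        match PySem.Dict.get? (PySem.Dict.mk p.2) max_level with
        | none => st   -- 'if max_level not in sequence_tree: continue'
        | some paths =>
          match calculate_min_path_length_py paths with
          | none => st   -- ValueError inside calculate_min_path_length; excluded by Pre_
          | some min_length =>
            let shortest := match st.1 with | none => min_length | some v => v
            let winners := if min_length == shortest then st.2 ++ [p.1] else st.2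
            if min_length < shortest then (some min_length, [p.1]) else (some shortest, winners))
      (none, [])
    if st.2.length == 1 then PySem.List.pyGet? st.2 0 else none

-- ===== PORT B =====
def get_winner_index_py_alt (seq_lengths : List (List (Int × List String))) : Option Int :=
  -- max_level = max(k for tree in seq_lengths for k in tree)  (none = ValueError, excluded by Pre_)
  match PySem.List.max?
      (seq_lengths.flatMap (fun tree => PySem.Dict.keys (PySem.Dict.mk tree))) (fun k => k) with
  | none => none
  | some max_level =>
    -- table = sorted(((i, min(len(p) for p in tree[max_level])) for i, tree in enumerate(seq_lengths)
    --                 if max_level in tree), key=lambda e: e[1])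
    -- (the inner 'none' = ValueError inside min(); excluded by Pre_)
    let table : List (Int × Int) := PySem.List.sorted
      ((PySem.List.enumerate seq_lengths).filterMap
        (fun p =>
          match PySem.Dict.get? (PySem.Dict.mk p.2) max_level with
          | none => none
          | some paths =>
            (PySem.List.min? (paths.map (fun q => PySem.Str.len q)) (fun x => x)).map
              (fun l => (p.1, l))))
      (fun e => e.2) false
    -- if len(table) == 1 or table[0][1] != table[1][1]: return table[0][0]
    match table with
    | [] => none
    | [a] => some a.1
    | a :: b :: _ => if a.2 != b.2 then some a.1 else none

-- ===== PRECONDITION & SPEC =====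
-- Pre_ excludes exactly the inputs where the Python raises ValueError: every tree empty
-- (max() of an empty sequence), or the tree value at the overall maximal key is the empty
-- list (min() of an empty sequence). Both A and B raise on exactly these inputs.
def Pre_get_winner_index_py (seq_lengths : List (List (Int × List String))) : Prop :=
  ∃ M ∈ seq_lengths.flatMap (fun t => t.map (fun p => p.1)),
    (∀ k ∈ seq_lengths.flatMap (fun t => t.map (fun p => p.1)), k ≤ M) ∧
    ∀ t ∈ seq_lengths, PySem.Dict.get? (PySem.Dict.mk t) M ≠ some []
instance (seq_lengths : List (List (Int × List String))) : Decidable (Pre_get_winner_index_py seq_lengths) := by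
  unfold Pre_get_winner_index_py; infer_instance

def pvWitness_get_winner_index_py : (List (List (Int × List String))) := [[(0, ["a"])]]

def Spec_get_winner_index_py (seq_lengths : List (List (Int × List String))) (out : Option Int) : Prop := out = get_winner_index_py_alt seq_lengths
instance (seq_lengths : List (List (Int × List String))) (out : Option Int) : Decidable (Spec_get_winner_index_py seq_lengths out) := by unfold Spec_get_winner_index_py; infer_instance

-- ===== CLAIM (what is proved, stated in full; the proofs are below) =====
def Claim_equal_get_winner_index_py : Prop := ∀ (seq_lengths : List (List (Int × List String))), Dom_get_winner_index_py seq_lengths → Pre_get_winner_index_py seq_lengths → Spec_get_winner_index_py seq_lengths (get_winner_index_py seq_lengths)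

-- ===== LEMMAS AND PROOFS =====

-- A's loop body on a table entry (i, min_length)
def pvStep (st : Option Int × List Int) (e : Int × Int) : Option Int × List Int :=
  let shortest := match st.1 with | none => e.2 | some v => v
  let winners := if e.2 == shortest then st.2 ++ [e.1] else st.2
  if e.2 < shortest then (some e.2, [e.1]) else (some shortest, winners)

-- running minimum of the lengths
def pvMin (m : Int) (t : List (Int × Int)) : Int := t.foldl (fun a e => min a e.2) m

theorem pvMin_le (t : List (Int × Int)) (m : Int) : pvMin m t ≤ m := by
  induction t generalizing m with
  | nil => simp [pvMin]
  | cons e rest ih =>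
    have h := ih (min m e.2)
    simp only [pvMin, List.foldl_cons] at h ⊢
    exact le_trans h (min_le_left _ _)

theorem pvMin_eq_foldl_map (t : List (Int × Int)) (m : Int) :
    pvMin m t = (t.map (fun e => e.2)).foldl min m := by
  simp [pvMin, List.foldl_map]

theorem pvFoldl_filterMap {α β σ : Type} (g : α → Option β) (f : σ → β → σ) (l : List α) (init : σ) :
    (l.filterMap g).foldl f init
      = l.foldl (fun st x => match g x with | none => st | some y => f st y) init := by
  induction l generalizing init with
  | nil => rfl
  | cons x xs ih =>
    cases hx : g x with
    | none => simp [hx, ih]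
    | some y => simp [hx, ih]

-- invariant of A's loop after the first entry has been absorbed
theorem pvArgmin (t : List (Int × Int)) (m : Int) (ws : List Int) :
    t.foldl pvStep (some m, ws)
      = (some (pvMin m t),
         (if m = pvMin m t then ws else [])
           ++ (t.filter (fun e => e.2 == pvMin m t)).map (fun e => e.1)) := by
  induction t generalizing m ws with
  | nil => simp [pvMin]
  | cons e rest ih =>
    have hmin : pvMin m (e :: rest) = pvMin (min m e.2) rest := by simp [pvMin]
    rcases lt_trichotomy e.2 m with hlt | heq | hgt
    · have hstep : pvStep (some m, ws) e = (some e.2, [e.1]) := by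
        simp [pvStep, hlt]
      have hmm : min m e.2 = e.2 := by omega
      have hle := pvMin_le rest e.2
      have h1 : ¬ (m = pvMin e.2 rest) := by omega
      rw [List.foldl_cons, hstep, ih, hmin, hmm, if_neg h1, List.filter_cons]
      generalize pvMin e.2 rest = q
      by_cases h2 : e.2 = q
      · simp [h2]
      · simp [h2]
    · subst heq
      have hstep : pvStep (some e.2, ws) e = (some e.2, ws ++ [e.1]) := by
        simp [pvStep]
      rw [List.foldl_cons, hstep, ih, hmin, min_self, List.filter_cons]
      generalize pvMin e.2 rest = q
      by_cases h : e.2 = q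
      · simp [h]
      · simp [h]
    · have hne : ¬ (e.2 == m) = true := by rw [beq_iff_eq]; omega
      have hstep : pvStep (some m, ws) e = (some m, ws) := by
        simp [pvStep, hne]; omega
      have hmm : min m e.2 = m := by omega
      have hle := pvMin_le rest m
      have he : ¬ (e.2 == pvMin m rest) = true := by rw [beq_iff_eq]; omega
      rw [List.foldl_cons, hstep, ih, hmin, hmm, List.filter_cons]
      simp [he]

theorem pvMax?_id_eq_some_iff (l : List Int) (m : Int) :
    PySem.List.max? l (fun x => x) = some m ↔ m ∈ l ∧ ∀ x ∈ l, x ≤ m := by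
  constructor
  · intro h
    exact ⟨PySem.List.max?_mem h, fun x hx => PySem.List.max?_isMax h x hx⟩
  · rintro ⟨hm, hub⟩
    cases hmax : PySem.List.max? l (fun x : Int => x) with
    | none =>
      rw [PySem.List.max?_eq_none_iff] at hmax
      subst hmax; cases hm
    | some m' =>
      have h1 : m' ∈ l := PySem.List.max?_mem hmax
      have h2 : m ≤ m' := PySem.List.max?_isMax hmax m hm
      have h3 : m' ≤ m := hub m' h1
      have : m' = m := le_antisymm h3 h2
      rw [this]

-- A's 'max of per-tree maxes over nonempty trees' equals B's 'max over all keys'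
theorem pvMaxEq (s : List (List (Int × List String))) :
    PySem.List.max?
      ((s.filter (fun t => 0 < PySem.List.len (PySem.Dict.keys (PySem.Dict.mk t)))).map
        (fun t => (PySem.List.max? (PySem.Dict.keys (PySem.Dict.mk t)) (fun k => k)).getD 0))
      (fun m => m)
    = PySem.List.max? (s.flatMap (fun t => PySem.Dict.keys (PySem.Dict.mk t))) (fun k => k) := by
  cases hB : PySem.List.max? (s.flatMap (fun t => PySem.Dict.keys (PySem.Dict.mk t))) (fun k : Int => k) with
  | none =>
    rw [PySem.List.max?_eq_none_iff] at hB
    rw [PySem.List.max?_eq_none_iff]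
    rw [List.flatMap_eq_nil_iff] at hB
    rw [List.map_eq_nil_iff, List.filter_eq_nil_iff]
    intro t ht
    have := hB t ht
    simp [PySem.Dict.keys, PySem.List.len] at this ⊢
    simp [this]
  | some M =>
    rw [pvMax?_id_eq_some_iff] at hB
    obtain ⟨hMmem, hMub⟩ := hB
    rw [pvMax?_id_eq_some_iff]
    rw [List.mem_flatMap] at hMmem
    obtain ⟨t0, ht0, hMt0⟩ := hMmem
    constructor
    · -- M is the per-tree max of a tree it belongs to
      rw [List.mem_map]
      refine ⟨t0, ?_, ?_⟩
      · rw [List.mem_filter]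
        refine ⟨ht0, ?_⟩
        have hne : t0 ≠ [] := by
          intro h
          rw [h] at hMt0
          simp [PySem.Dict.keys] at hMt0
        have hpos : 0 < t0.length := List.length_pos_iff.mpr hne
        simpa [PySem.Dict.keys, PySem.List.len] using hpos
      · cases hmax : PySem.List.max? (PySem.Dict.keys (PySem.Dict.mk t0)) (fun k : Int => k) with
        | none =>
          rw [PySem.List.max?_eq_none_iff] at hmax
          rw [hmax] at hMt0; cases hMt0
        | some m' =>
          have h1 : m' ∈ PySem.Dict.keys (PySem.Dict.mk t0) := PySem.List.max?_mem hmax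
          have h2 : M ≤ m' := PySem.List.max?_isMax hmax M hMt0
          have h3 : m' ≤ M := hMub m' (List.mem_flatMap.mpr ⟨t0, ht0, h1⟩)
          simp [le_antisymm h3 h2]
    · -- every per-tree max is ≤ M
      intro x hx
      rw [List.mem_map] at hx
      obtain ⟨t, ht, hxt⟩ := hx
      rw [List.mem_filter] at ht
      obtain ⟨ht, hne⟩ := ht
      cases hmax : PySem.List.max? (PySem.Dict.keys (PySem.Dict.mk t)) (fun k : Int => k) with
      | none =>
        exfalso
        rw [PySem.List.max?_eq_none_iff] at hmax
        simp only [PySem.Dict.keys] at hmax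
        have ht' : t = [] := List.map_eq_nil_iff.mp hmax
        subst ht'
        simp at hne
      | some m' =>
        have h1 : m' ∈ PySem.Dict.keys (PySem.Dict.mk t) := PySem.List.max?_mem hmax
        have h3 : m' ≤ M := hMub m' (List.mem_flatMap.mpr ⟨t, ht, h1⟩)
        rw [hmax] at hxt
        simp at hxt
        omega

-- B's 'first two of the stably sorted table' decision equals A's 'unique index at the minimum'
theorem pvSortCase (e : Int × Int) (rest : List (Int × Int)) :
    (match PySem.List.sorted (e :: rest) (fun x => x.2) false with
     | [] => none
     | [a] => some a.1
     | a :: b :: _ => if a.2 != b.2 then some a.1 else none)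
    = (if (((e :: rest).filter (fun x => x.2 == pvMin e.2 rest)).map (fun x => x.1)).length == 1
       then PySem.List.pyGet? (((e :: rest).filter (fun x => x.2 == pvMin e.2 rest)).map (fun x => x.1)) 0
       else none) := by
  set q := pvMin e.2 rest with hq
  set t := e :: rest with ht
  have hperm : (PySem.List.sorted t (fun x => x.2) false).Perm t := PySem.List.sorted_perm t (fun x => x.2) false
  -- q is a lower bound of all keys and is attained
  have hmin := PySem.List.foldl_min_le (rest.map (fun x => x.2)) e.2
  have hmem := PySem.List.foldl_min_mem (rest.map (fun x => x.2)) e.2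
  rw [← pvMin_eq_foldl_map, ← hq] at hmin hmem
  have hlb : ∀ y ∈ t, q ≤ y.2 := by
    intro y hy
    rcases List.mem_cons.mp hy with h | h
    · rw [h]; exact hmin.1
    · exact hmin.2 _ (List.mem_map_of_mem h)
  have hatt : ∃ y ∈ t, y.2 = q := by
    rcases hmem with h | h
    · exact ⟨e, List.mem_cons_self, h.symm⟩
    · rcases List.mem_map.mp h with ⟨y, hy, hyq⟩
      exact ⟨y, List.mem_cons_of_mem _ hy, hyq⟩
  have hcount : (PySem.List.sorted t (fun x => x.2) false).countP (fun x => x.2 == q)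
      = t.countP (fun x => x.2 == q) := hperm.countP_eq _
  have hflen : (t.filter (fun x => x.2 == q)).length = t.countP (fun x => x.2 == q) :=
    List.countP_eq_length_filter.symm
  cases hs : PySem.List.sorted t (fun x => x.2) false with
  | nil =>
    exfalso
    have := (PySem.List.sorted_eq_nil_iff t (fun x => x.2) false).mp hs
    simp [ht] at this
  | cons a s' =>
    have hale : ∀ y ∈ t, a.2 ≤ y.2 := PySem.List.key_head_sorted_le t (fun x => x.2) hs
    have hamem : a ∈ t := hperm.mem_iff.mp (hs ▸ List.mem_cons_self)
    have haq : a.2 = q := by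
      obtain ⟨y, hy, hyq⟩ := hatt
      have := hale y hy
      have := hlb a hamem
      omega
    have hpw : (a :: s').Pairwise (fun x y => x.2 ≤ y.2) := hs ▸ PySem.List.sorted_pairwise t (fun x => x.2)
    cases s' with
    | nil =>
      -- exactly one element: the unique winner
      have h1 : t.countP (fun x => x.2 == q) = 1 := by
        rw [← hcount, hs]
        simp [haq]
      rw [← hflen] at h1
      obtain ⟨f, hf⟩ := List.length_eq_one_iff.mp h1
      have haf : a = f := by
        have : a ∈ t.filter (fun x => x.2 == q) :=
          List.mem_filter.mpr ⟨hamem, by simp [haq]⟩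
        rw [hf] at this
        simpa using this
      subst haf
      rw [hf]
      simp [PySem.List.pyGet?, PySem.List.pyIdx?]
    | cons b s'' =>
      by_cases hab : a.2 = b.2
      · -- at least two at the minimum: no unique winner
        have hbmem : b ∈ t := hperm.mem_iff.mp (hs ▸ (List.mem_cons_of_mem _ List.mem_cons_self))
        have h2 : 2 ≤ t.countP (fun x => x.2 == q) := by
          rw [← hcount, hs]
          simp only [List.countP_cons]
          have hbq : b.2 = q := by omega
          simp [haq, hbq]
        rw [← hflen] at h2
        have hlen2 : ¬ ((t.filter (fun x => x.2 == q)).map (fun x => x.1)).length == 1 := by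
          rw [List.length_map, beq_iff_eq]; omega
        rw [if_neg hlen2]
        simp [hab]
      · -- second key larger: the head is the unique minimum
        have hbgt : q < b.2 := by
          have := hlb b (hperm.mem_iff.mp (hs ▸ (List.mem_cons_of_mem _ List.mem_cons_self)))
          omega
        have hs''gt : ∀ y ∈ s'', q < y.2 := by
          intro y hy
          have hb2 : b.2 ≤ y.2 := (List.pairwise_cons.mp (List.pairwise_cons.mp hpw).2).1 y hy
          omega
        have h1 : t.countP (fun x => x.2 == q) = 1 := by
          rw [← hcount, hs]
          simp only [List.countP_cons]
          have : s''.countP (fun x => x.2 == q) = 0 := by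
            rw [List.countP_eq_zero]
            intro y hy
            have := hs''gt y hy
            simp; omega
          have hbne : ¬ (b.2 == q) = true := by simp; omega
          simp [haq, this, hbne]
        rw [← hflen] at h1
        obtain ⟨f, hf⟩ := List.length_eq_one_iff.mp h1
        have haf : a = f := by
          have : a ∈ t.filter (fun x => x.2 == q) :=
            List.mem_filter.mpr ⟨hamem, by simp [haq]⟩
          rw [hf] at this
          simpa using this
        subst haf
        rw [hf]
        simp [hab, PySem.List.pyGet?, PySem.List.pyIdx?]

-- ===== VERDICT (by name: the statement is the Claim_ definition above) =====
theorem get_winner_index_py_spec : Claim_equal_get_winner_index_py := by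
  intro s _ _
  unfold Spec_get_winner_index_py get_winner_index_py get_winner_index_py_alt
  rw [pvMaxEq s]
  cases hM : PySem.List.max? (s.flatMap (fun t => PySem.Dict.keys (PySem.Dict.mk t))) (fun k : Int => k) with
  | none => rfl
  | some M =>
    -- the table both sides are (implicitly / explicitly) iterating over
    set g : (Int × List (Int × List String)) → Option (Int × Int) :=
      (fun p =>
        match PySem.Dict.get? (PySem.Dict.mk p.2) M with
        | none => none
        | some paths =>
          (PySem.List.min? (paths.map (fun q => PySem.Str.len q)) (fun x => x)).map
            (fun l => (p.1, l))) with hg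
    have hfold : (PySem.List.enumerate s).foldl
        (fun (st : Option Int × List Int) p =>
          match PySem.Dict.get? (PySem.Dict.mk p.2) M with
          | none => st
          | some paths =>
            match calculate_min_path_length_py paths with
            | none => st
            | some min_length =>
              let shortest := match st.1 with | none => min_length | some v => v
              let winners := if min_length == shortest then st.2 ++ [p.1] else st.2
              if min_length < shortest then (some min_length, [p.1]) else (some shortest, winners))
        (none, [])
        = ((PySem.List.enumerate s).filterMap g).foldl pvStep (none, []) := by
      rw [pvFoldl_filterMap]
      apply PySem.List.foldl_congr_mem
      intro acc p _
      rw [hg]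
      cases hget : PySem.Dict.get? (PySem.Dict.mk p.2) M with
      | none => simp only [hget]
      | some paths =>
        simp only [hget]
        have hcalc : calculate_min_path_length_py paths
            = PySem.List.min? (paths.map (fun q => PySem.Str.len q)) (fun x => x) := rfl
        rw [hcalc]
        cases hmin : PySem.List.min? (paths.map (fun q => PySem.Str.len q)) (fun x : Int => x) with
        | none => rfl
        | some l => rfl
    simp only [hfold]
    cases htab : (PySem.List.enumerate s).filterMap g with
    | nil => rfl
    | cons e rest =>
      -- A's side: absorb the first entry, then the running-minimum invariant
      have hfirst : pvStep (none, ([] : List Int)) e = (some e.2, [e.1]) := by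
        simp [pvStep]
      rw [List.foldl_cons, hfirst, pvArgmin, pvSortCase e rest]
      -- both sides are now the same decision over the filtered winners
      generalize pvMin e.2 rest = q
      rw [List.filter_cons]
      by_cases hc : e.2 = q
      · subst hc
        rw [if_pos rfl, if_pos (beq_self_eq_true e.2), List.map_cons, List.singleton_append]
      · have hb : (e.2 == q) = false := by rwa [beq_eq_false_iff_ne]
        have hb' : ¬ ((e.2 == q) = true) := by rw [hb]; exact Bool.false_ne_true
        rw [if_neg hc, if_neg hb', List.nil_append]
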